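-- pv_equiv track=rewrite | github.com/Enirsa/ContextFreeGrammarParser | algorithms.py | __remove_unreachable_vars
-- ===== SOURCE A (Python) =====
-- from collections import OrderedDict
--
-- def __remove_unreachable_vars(old_grammar):
--     new_grammar = OrderedDict()
--     reachable_vars = set()
--     start_variable = list(old_grammar.keys())[0]
--     reachable_vars.add(start_variable)
--     __fill_reachable_vars(start_variable, old_grammar, reachable_vars)
--
--     for variable in old_grammar:
--         if variable in reachable_vars:
--             new_grammar[variable] = set(old_grammar[variable])
--
--     return new_grammar
--
-- def __fill_reachable_vars(variable, grammar, reachable_vars):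
--     for replacement in grammar[variable]:
--         for symbol in replacement:
--             if symbol[0] == 'v' and symbol[1] not in reachable_vars:
--                 reachable_vars.add(symbol[1])
--                 __fill_reachable_vars(symbol[1], grammar, reachable_vars)
-- ===== SOURCE B (Python) =====
-- from collections import OrderedDict
--
--
-- def __remove_unreachable_vars(old_grammar):
--     # iterative worklist reachability instead of recursive helper
--     start_variable = next(iter(old_grammar))
--     reachable_vars = {start_variable}
--     stack = [start_variable]
--     while stack:
--         variable = stack.pop()
--         for replacement in old_grammar[variable]:
--             for symbol in replacement:
--                 if symbol[0] == 'v' and symbol[1] not in reachable_vars: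
--                     reachable_vars.add(symbol[1])
--                     stack.append(symbol[1])
--     return OrderedDict((variable, set(old_grammar[variable]))
--                        for variable in old_grammar if variable in reachable_vars)
-- ===== Notes on version B (the rewrite author's own statement) =====
-- stated objective: alternative
-- what changed: The recursive depth-first helper __fill_reachable_vars is replaced by a single iterative worklist loop (an explicit stack seeded with the start variable) that computes the same reachable set without recursion, and the result dict is built by a comprehension; Pre_ excludes exactly the inputs where A raises (empty grammar, or a reachable variable that is missing from the grammar or has an empty or lone-'v' production symbol).
import Mathlib
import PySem

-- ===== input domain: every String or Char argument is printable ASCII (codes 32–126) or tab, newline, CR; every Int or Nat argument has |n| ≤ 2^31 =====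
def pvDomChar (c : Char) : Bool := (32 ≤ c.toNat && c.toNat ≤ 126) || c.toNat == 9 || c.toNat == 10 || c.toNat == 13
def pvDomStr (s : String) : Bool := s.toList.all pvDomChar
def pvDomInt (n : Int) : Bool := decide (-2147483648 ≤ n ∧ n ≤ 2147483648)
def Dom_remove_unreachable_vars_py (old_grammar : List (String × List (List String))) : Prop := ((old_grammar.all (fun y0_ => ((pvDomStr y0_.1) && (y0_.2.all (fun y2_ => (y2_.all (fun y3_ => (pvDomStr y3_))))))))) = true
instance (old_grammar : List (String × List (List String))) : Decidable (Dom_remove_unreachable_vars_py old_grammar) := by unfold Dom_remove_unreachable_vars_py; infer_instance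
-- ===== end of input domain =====

-- B replaces A's recursive depth-first helper by one iterative worklist (explicit stack) loop;
-- same return value, no speed claim.

-- ===== PORT A =====

-- fuel: an upper bound on the recursion depth of __fill_reachable_vars (each nested call
-- permanently adds a new symbol-derived variable to the set, so depth ≤ total symbol count + 1);
-- it is a totality guard only, never reached.
def pvFuel (old_grammar : List (String × List (List String))) : Nat :=
  (((PySem.Dict.ofList old_grammar).values.map (fun reps => (reps.map List.length).sum)).sum) + 1

-- __fill_reachable_vars: recursion over the grammar, set passed (functionally) through
def pvFillA (g : PySem.Dict String (List (List String))) :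
    Nat → String → PySem.Set String → PySem.Set String
  | 0, _, reach => reach
  | fuel+1, v, reach =>
    (g.getD v []).foldl (fun reach rep =>
      rep.foldl (fun reach s =>
        if PySem.Str.pyGet? s 0 = some 'v' then
          match PySem.Str.pyGet? s 1 with
          | some c =>
            if PySem.Set.contains reach (String.singleton c) then reach
            else pvFillA g fuel (String.singleton c) (PySem.Set.add reach (String.singleton c))
          | none => reach             -- Python raises IndexError here; excluded by Pre_
        else reach) reach) reach

def remove_unreachable_vars_py (old_grammar : List (String × List (List String))) :
    List (String × List (List String)) :=
  let g := PySem.Dict.ofList old_grammar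
  match g.keys with
  | [] => []                          -- Python raises IndexError here; excluded by Pre_
  | start :: _ =>
    let reach := pvFillA g (pvFuel old_grammar) start (PySem.Set.add PySem.Set.empty start)
    g.keys.foldl (fun acc v =>
      if PySem.Set.contains reach v then acc ++ [(v, PySem.Set.ofList (g.getD v []))] else acc) []

-- ===== PORT B =====

-- the while-stack loop of Source B; state = (stack, reachable_vars); fuel = totality guard only
def pvLoopB (g : PySem.Dict String (List (List String))) :
    Nat → List String × PySem.Set String → PySem.Set String
  | 0, st => st.2
  | fuel+1, st =>
    match PySem.List.pop? st.1 (-1) with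
    | none => st.2                    -- stack empty: while loop ends
    | some (v, rest) =>
      pvLoopB g fuel ((g.getD v []).foldl (fun st rep =>
        rep.foldl (fun (st : List String × PySem.Set String) s =>
          match PySem.Str.pyGet? s 0, PySem.Str.pyGet? s 1 with
          | some c0, some c1 =>
            if c0 = 'v' ∧ ¬ (PySem.Set.contains st.2 (String.singleton c1) = true) then
              (st.1 ++ [String.singleton c1], PySem.Set.add st.2 (String.singleton c1))
            else st
          | _, _ => st) st) (rest, st.2))

def remove_unreachable_vars_py_alt (old_grammar : List (String × List (List String))) :
    List (String × List (List String)) :=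
  let g := PySem.Dict.ofList old_grammar
  match g.keys with
  | [] => []                          -- Python raises StopIteration here; excluded by Pre_
  | start :: _ =>
    let reach := pvLoopB g (pvFuel old_grammar + 1) ([start], PySem.Set.add PySem.Set.empty start)
    g.keys.filterMap (fun v =>
      if PySem.Set.contains reach v then some (v, PySem.Set.ofList (g.getD v [])) else none)

-- ===== PRECONDITION & SPEC =====

-- the variable a production symbol points at, if any ('v' followed by a character)
def pvSym? (s : String) : Option String :=
  match PySem.Str.pyGet? s 0, PySem.Str.pyGet? s 1 with
  | some c0, some c1 => if c0 = 'v' then some (String.singleton c1) else none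
  | _, _ => none

-- direct successors of a variable in the grammar
def pvSuccs (g : PySem.Dict String (List (List String))) (v : String) : List String :=
  ((g.getD v []).flatMap id) |>.filterMap pvSym?

-- everything reachable from the start variable, as a saturating closure
-- (old_grammar.length + 1 rounds always reach the fixpoint: every round before it adds a member)
def pvReachClosure (old_grammar : List (String × List (List String))) : PySem.Set String :=
  match (PySem.Dict.ofList old_grammar).keys with
  | [] => PySem.Set.empty
  | start :: _ =>
    (List.range (old_grammar.length + 1)).foldl
      (fun S _ => PySem.Set.update S
        (S.flatMap (fun v => pvSuccs (PySem.Dict.ofList old_grammar) v)))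
      (PySem.Set.ofList [start])

-- Pre_ = exactly the inputs on which the Python A returns: the grammar is nonempty and every
-- variable reachable from the start variable names a grammar key all of whose production
-- symbols are well formed (nonempty, and a 'v'-symbol has a character after the 'v'); on the
-- excluded inputs A raises IndexError or KeyError.
def Pre_remove_unreachable_vars_py (old_grammar : List (String × List (List String))) : Prop :=
  old_grammar ≠ [] ∧ ∀ v ∈ pvReachClosure old_grammar,
    (PySem.Dict.ofList old_grammar).contains v = true ∧
    ∀ rep ∈ (PySem.Dict.ofList old_grammar).getD v [], ∀ s ∈ rep,
      s ≠ "" ∧ (PySem.Str.pyGet? s 0 = some 'v' → (PySem.Str.pyGet? s 1).isSome = true)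
instance (old_grammar : List (String × List (List String))) :
    Decidable (Pre_remove_unreachable_vars_py old_grammar) := by
  unfold Pre_remove_unreachable_vars_py; infer_instance

def pvWitness_remove_unreachable_vars_py : (List (String × List (List String))) :=
  [("S", [["vA", "t"]]), ("A", [["x"]]), ("B", [["y"]])]

def Spec_remove_unreachable_vars_py (old_grammar : List (String × List (List String)))
    (out : List (String × List (List String))) : Prop :=
  out = remove_unreachable_vars_py_alt old_grammar
instance (old_grammar : List (String × List (List String)))
    (out : List (String × List (List String))) :
    Decidable (Spec_remove_unreachable_vars_py old_grammar out) := by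
  unfold Spec_remove_unreachable_vars_py; infer_instance

-- ===== CLAIM (what is proved, stated in full; the proofs are below) =====
def Claim_equal_remove_unreachable_vars_py : Prop :=
  ∀ (old_grammar : List (String × List (List String))),
    Dom_remove_unreachable_vars_py old_grammar →
    Pre_remove_unreachable_vars_py old_grammar →
    Spec_remove_unreachable_vars_py old_grammar (remove_unreachable_vars_py old_grammar)

-- ===== LEMMAS AND PROOFS =====

-- all variables any symbol of the grammar can point at
def pvCand (g : PySem.Dict String (List (List String))) : List String :=
  g.values.flatMap (fun reps => (reps.flatMap id).filterMap pvSym?)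

-- measure: candidate variables not yet in the reachable set
def pvM (g : PySem.Dict String (List (List String))) (R : List String) : Nat :=
  ((pvCand g).toFinset \ R.toFinset).card

-- reachability specification
def pvReach (g : PySem.Dict String (List (List String))) (start x : String) : Prop :=
  Relation.ReflTransGen (fun a b => b ∈ pvSuccs g a) start x

theorem pvFoldlPred {α β : Type} (P : β → Prop) (l : List α) (f : β → α → β) (b : β)
    (hP : P b) (hpres : ∀ a ∈ l, ∀ b', P b' → P (f b' a)) : P (l.foldl f b) := by
  induction l generalizing b with
  | nil => exact hP
  | cons a l ih =>
    exact ih (f b a) (hpres a (by simp) b hP) (fun a' ha' b' hb' => hpres a' (by simp [ha']) b' hb')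

theorem pvFoldlRelInv {α β : Type} (r : β → β → Prop) (inv : β → Prop)
    (htrans : ∀ x y z, r x y → r y z → r x z)
    (hrefl : ∀ x, inv x → r x x)
    (l : List α) (f : β → α → β) (b : β) (hb : inv b)
    (hstep : ∀ a ∈ l, ∀ x, inv x → r x (f x a) ∧ inv (f x a)) :
    r b (l.foldl f b) := by
  induction l generalizing b with
  | nil => exact hrefl b hb
  | cons a l ih =>
    obtain ⟨h1, h2⟩ := hstep a (by simp) b hb
    exact htrans _ _ _ h1 (ih (f b a) h2 (fun a' ha' x hx => hstep a' (by simp [ha']) x hx))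

theorem pvFoldlAttain {α β : Type} (P : β → Prop) (l : List α) (f : β → α → β) (b : β)
    (a : α) (ha : a ∈ l) (hstep : ∀ x, P (f x a))
    (hpres : ∀ a' ∈ l, ∀ x, P x → P (f x a')) : P (l.foldl f b) := by
  induction l generalizing b with
  | nil => cases ha
  | cons a0 l ih =>
    have hpres' : ∀ a' ∈ l, ∀ x, P x → P (f x a') :=
      fun a' ha' => hpres a' (List.mem_cons_of_mem _ ha')
    rcases List.mem_cons.mp ha with h | h
    · exact pvFoldlPred P l f (f b a0) (h ▸ hstep b) hpres'
    · exact ih (f b a0) h hpres'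

theorem pvMem_succs {g : PySem.Dict String (List (List String))} {v t : String} :
    t ∈ pvSuccs g v ↔ ∃ rep ∈ g.getD v [], ∃ s ∈ rep, pvSym? s = some t := by
  simp [pvSuccs, List.mem_filterMap]

theorem pvGetD_mem_values {g : PySem.Dict String (List (List String))} {v : String}
    (h : g.contains v = true) : g.getD v [] ∈ g.values := by
  have h2 : (g.get? v).isSome = true := by
    rw [← PySem.Dict.contains_eq_isSome_get?]; exact h
  obtain ⟨w, hw⟩ := Option.isSome_iff_exists.mp h2
  have hit := PySem.Dict.mem_items_of_get?_eq_some g hw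
  have hgd : g.getD v [] = w := by rw [PySem.Dict.getD_eq_get?_getD, hw]; rfl
  show (g.getD v []) ∈ g.items.map Prod.snd
  rw [hgd]
  exact List.mem_map_of_mem hit

theorem pvSucc_mem_cand {g : PySem.Dict String (List (List String))} {v t : String}
    (ht : t ∈ pvSuccs g v) : t ∈ pvCand g := by
  by_cases h : g.contains v = true
  · have hv := pvGetD_mem_values h
    unfold pvCand
    exact List.mem_flatMap.mpr ⟨g.getD v [], hv, ht⟩
  · have : g.getD v [] = [] :=
      PySem.Dict.getD_of_not_contains g [] (by simpa using h)
    unfold pvSuccs at ht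
    rw [this] at ht
    simp at ht

theorem pvM_mono (g : PySem.Dict String (List (List String))) {R1 R2 : List String}
    (h : ∀ x ∈ R1, x ∈ R2) : pvM g R2 ≤ pvM g R1 := by
  apply Finset.card_le_card
  intro x hx
  simp only [Finset.mem_sdiff, List.mem_toFinset] at hx ⊢
  exact ⟨hx.1, fun hm => hx.2 (h x hm)⟩

theorem pvM_add_lt (g : PySem.Dict String (List (List String))) {R : List String} {t : String}
    (ht : t ∈ pvCand g) (hnt : t ∉ R) : pvM g (PySem.Set.add R t) < pvM g R := by
  unfold pvM
  apply Finset.card_lt_card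
  rw [PySem.Set.add_of_not_mem hnt]
  constructor
  · intro x hx
    simp only [Finset.mem_sdiff, List.mem_toFinset, List.mem_append, List.mem_singleton] at hx ⊢
    exact ⟨hx.1, fun hm => hx.2 (Or.inl hm)⟩
  · intro hsub
    have hmem : t ∈ (pvCand g).toFinset \ R.toFinset := by
      simp only [Finset.mem_sdiff, List.mem_toFinset]; exact ⟨ht, hnt⟩
    have := hsub hmem
    simp only [Finset.mem_sdiff, List.mem_toFinset, List.mem_append, List.mem_singleton] at this
    simp at this

theorem pvM_lt_fuel (old_grammar : List (String × List (List String))) (R : List String) :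
    pvM (PySem.Dict.ofList old_grammar) R < pvFuel old_grammar := by
  have h1 : pvM (PySem.Dict.ofList old_grammar) R ≤
      (pvCand (PySem.Dict.ofList old_grammar)).toFinset.card :=
    Finset.card_le_card (Finset.sdiff_subset)
  have h2 : (pvCand (PySem.Dict.ofList old_grammar)).toFinset.card ≤
      (pvCand (PySem.Dict.ofList old_grammar)).length := List.toFinset_card_le _
  have h3 : (pvCand (PySem.Dict.ofList old_grammar)).length ≤
      (((PySem.Dict.ofList old_grammar).values.map
        (fun reps => (reps.map List.length).sum)).sum) := by
    unfold pvCand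
    rw [List.length_flatMap]
    apply List.sum_le_sum
    intro reps _
    calc ((reps.flatMap id).filterMap pvSym?).length
        ≤ (reps.flatMap id).length := List.length_filterMap_le _ _
      _ = (reps.map List.length).sum := by simp [List.length_flatMap]
  unfold pvFuel
  omega

-- A's symbol step, rewritten through pvSym?
theorem pvStepA_eq (g : PySem.Dict String (List (List String))) (fuel : Nat)
    (R : PySem.Set String) (s : String) :
    (if PySem.Str.pyGet? s 0 = some 'v' then
        match PySem.Str.pyGet? s 1 with
        | some c =>
          if PySem.Set.contains R (String.singleton c) then R
          else pvFillA g fuel (String.singleton c) (PySem.Set.add R (String.singleton c))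
        | none => R
      else R)
    = match pvSym? s with
      | some t => if PySem.Set.contains R t then R else pvFillA g fuel t (PySem.Set.add R t)
      | none => R := by
  unfold pvSym?
  cases h0 : PySem.Str.pyGet? s 0 with
  | none => simp
  | some c0 =>
    cases h1 : PySem.Str.pyGet? s 1 with
    | none => by_cases hv : c0 = 'v' <;> simp [hv]
    | some c1 => by_cases hv : c0 = 'v' <;> simp [hv]

-- B's symbol step, rewritten through pvSym?
theorem pvStepB_eq (p : List String × PySem.Set String) (s : String) :
    (match PySem.Str.pyGet? s 0, PySem.Str.pyGet? s 1 with
      | some c0, some c1 =>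
        if c0 = 'v' ∧ ¬ (PySem.Set.contains p.2 (String.singleton c1) = true) then
          (p.1 ++ [String.singleton c1], PySem.Set.add p.2 (String.singleton c1))
        else p
      | _, _ => p)
    = match pvSym? s with
      | some t => if PySem.Set.contains p.2 t then p else (p.1 ++ [t], PySem.Set.add p.2 t)
      | none => p := by
  unfold pvSym?
  cases h0 : PySem.Str.pyGet? s 0 with
  | none => simp
  | some c0 =>
    cases h1 : PySem.Str.pyGet? s 1 with
    | none => by_cases hv : c0 = 'v' <;> simp [hv]
    | some c1 =>
      by_cases hv : c0 = 'v' <;>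
        by_cases hc : PySem.Set.contains p.2 (String.singleton c1) = true <;> simp [hv, hc]

-- A's unfolding with symbol steps expressed through pvSym?
theorem pvFillA_succ_eq (g : PySem.Dict String (List (List String))) (fuel : Nat)
    (v : String) (R : PySem.Set String) :
    pvFillA g (fuel+1) v R = (g.getD v []).foldl (fun R rep =>
      rep.foldl (fun R s =>
        match pvSym? s with
        | some t => if PySem.Set.contains R t then R
                    else pvFillA g fuel t (PySem.Set.add R t)
        | none => R) R) R := by
  conv_lhs => rw [pvFillA]
  simp only [pvStepA_eq]

theorem pvFillA_mono_sound (g : PySem.Dict String (List (List String))) :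
    ∀ fuel v R,
      (∀ x ∈ R, x ∈ pvFillA g fuel v R) ∧
      (∀ x ∈ pvFillA g fuel v R,
        x ∈ R ∨ Relation.TransGen (fun a b => b ∈ pvSuccs g a) v x) := by
  intro fuel
  induction fuel with
  | zero =>
    intro v R
    constructor
    · intro x hx; simpa [pvFillA] using hx
    · intro x hx; left; simpa [pvFillA] using hx
  | succ fuel ih =>
    intro v R
    rw [pvFillA_succ_eq]
    set r : PySem.Set String → PySem.Set String → Prop := fun R1 R2 =>
      (∀ x ∈ R1, x ∈ R2) ∧
      (∀ x ∈ R2, x ∈ R1 ∨ Relation.TransGen (fun a b => b ∈ pvSuccs g a) v x) with hrdef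
    have hrefl : ∀ R1, r R1 R1 := fun R1 => ⟨fun x h => h, fun x h => Or.inl h⟩
    have htrans : ∀ a b c, r a b → r b c → r a c := by
      rintro a b c ⟨m1, s1⟩ ⟨m2, s2⟩
      refine ⟨fun x hx => m2 x (m1 x hx), fun x hx => ?_⟩
      rcases s2 x hx with h | h
      · exact s1 x h
      · exact Or.inr h
    refine pvFoldlRelInv r (fun _ => True) htrans (fun x _ => hrefl x) _ _ R trivial ?_
    intro rep hrep R1 _
    refine ⟨pvFoldlRelInv r (fun _ => True) htrans (fun x _ => hrefl x) _ _ R1 trivial ?_, trivial⟩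
    intro s hs R2 _
    refine ⟨?_, trivial⟩
    cases hsym : pvSym? s with
    | none => simpa [hsym] using hrefl R2
    | some t =>
      simp only [hsym]
      by_cases hc : t ∈ R2
      · rw [if_pos ((PySem.Set.contains_iff _ _).mpr hc)]
        exact hrefl R2
      · rw [if_neg (fun h => hc ((PySem.Set.contains_iff _ _).mp h))]
        have hedge : t ∈ pvSuccs g v := pvMem_succs.mpr ⟨rep, hrep, s, hs, hsym⟩
        obtain ⟨hm, hsound⟩ := ih t (PySem.Set.add R2 t)
        constructor
        · intro x hx
          exact hm x ((PySem.Set.mem_add R2 t x).mpr (Or.inl hx))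
        · intro x hx
          rcases hsound x hx with h | h
          · rcases (PySem.Set.mem_add R2 t x).mp h with h' | h'
            · exact Or.inl h'
            · exact Or.inr (h' ▸ Relation.TransGen.single hedge)
          · exact Or.inr (Relation.TransGen.head hedge h)

theorem pvFillA_mono (g : PySem.Dict String (List (List String))) (fuel : Nat) (v : String)
    (R : PySem.Set String) : ∀ x ∈ R, x ∈ pvFillA g fuel v R :=
  (pvFillA_mono_sound g fuel v R).1

-- each symbol step of A only grows the set
theorem pvStepA_mono (g : PySem.Dict String (List (List String))) (fuel : Nat) (s : String)
    (R : PySem.Set String) : ∀ x ∈ R,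
      x ∈ (match pvSym? s with
        | some t => if PySem.Set.contains R t then R else pvFillA g fuel t (PySem.Set.add R t)
        | none => R) := by
  intro x hx
  cases hsym : pvSym? s with
  | none => simpa [hsym] using hx
  | some t =>
    simp only [hsym]
    by_cases hc : t ∈ R
    · rw [if_pos ((PySem.Set.contains_iff _ _).mpr hc)]; exact hx
    · rw [if_neg (fun h => hc ((PySem.Set.contains_iff _ _).mp h))]
      exact pvFillA_mono g fuel t _ x ((PySem.Set.mem_add R t x).mpr (Or.inl hx))

theorem pvFillA_succ_self (g : PySem.Dict String (List (List String))) (fuel : Nat) (v : String)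
    (R : PySem.Set String) (hf : 1 ≤ fuel) : ∀ z ∈ pvSuccs g v, z ∈ pvFillA g fuel v R := by
  obtain ⟨fuel', rfl⟩ : ∃ f, fuel = f + 1 := ⟨fuel - 1, by omega⟩
  intro z hz
  obtain ⟨rep, hrep, s, hs, hsym⟩ := pvMem_succs.mp hz
  rw [pvFillA_succ_eq]
  refine pvFoldlAttain (fun R' => z ∈ R') _ _ R rep hrep ?_ ?_
  · intro R1
    refine pvFoldlAttain (fun R' => z ∈ R') _ _ R1 s hs ?_ ?_
    · intro R2
      simp only [hsym]
      by_cases hc : z ∈ R2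
      · rw [if_pos ((PySem.Set.contains_iff _ _).mpr hc)]; exact hc
      · rw [if_neg (fun h => hc ((PySem.Set.contains_iff _ _).mp h))]
        exact pvFillA_mono g fuel' z _ z ((PySem.Set.mem_add R2 z z).mpr (Or.inr rfl))
    · intro s' _ R2 hz2
      exact pvStepA_mono g fuel' s' R2 z hz2
  · intro rep' _ R1 hz1
    exact pvFoldlPred (fun R' => z ∈ R') _ _ R1 hz1 (fun s' _ R2 hz2 => pvStepA_mono g fuel' s' R2 z hz2)

theorem pvFillA_closed (g : PySem.Dict String (List (List String))) :
    ∀ fuel v R, pvM g R < fuel →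
      ∀ y ∈ pvFillA g fuel v R, y ∉ R →
        ∀ z ∈ pvSuccs g y, z ∈ pvFillA g fuel v R := by
  intro fuel
  induction fuel with
  | zero => intro v R h; exact absurd h (Nat.not_lt_zero _)
  | succ fuel ih =>
    intro v R hM
    rw [pvFillA_succ_eq]
    by_cases hgv : g.contains v = true
    case neg =>
      have hnil : g.getD v [] = [] :=
        PySem.Dict.getD_of_not_contains g [] (by simpa using hgv)
      rw [hnil]
      intro y hy hyR
      exact absurd hy hyR
    case pos =>
      set r : PySem.Set String → PySem.Set String → Prop := fun R1 R2 =>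
        (∀ x ∈ R1, x ∈ R2) ∧
        (∀ y ∈ R2, y ∉ R1 → ∀ z ∈ pvSuccs g y, z ∈ R2) ∧
        pvM g R2 ≤ pvM g R1 with hrdef
      have hrefl : ∀ R1, r R1 R1 :=
        fun R1 => ⟨fun x h => h, fun y _ hy => absurd ‹y ∈ R1› hy, le_refl _⟩
      have htrans : ∀ a b c, r a b → r b c → r a c := by
        rintro a b c ⟨m1, c1, l1⟩ ⟨m2, c2, l2⟩
        refine ⟨fun x hx => m2 x (m1 x hx), ?_, le_trans l2 l1⟩
        intro y hy hya
        by_cases hyb : y ∈ b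
        · exact fun z hz => m2 z (c1 y hyb hya z hz)
        · exact c2 y hy hyb
      have hmain : r R ((g.getD v []).foldl (fun R rep =>
          rep.foldl (fun R s =>
            match pvSym? s with
            | some t => if PySem.Set.contains R t then R
                        else pvFillA g fuel t (PySem.Set.add R t)
            | none => R) R) R) := by
        refine pvFoldlRelInv r (fun R' => pvM g R' ≤ fuel) htrans (fun x _ => hrefl x)
          _ _ R (by omega) ?_
        intro rep hrep R1 hinv1
        have hsub : ∀ s ∈ rep, ∀ R2, pvM g R2 ≤ fuel →
            r R2 (match pvSym? s with
              | some t => if PySem.Set.contains R2 t then R2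
                          else pvFillA g fuel t (PySem.Set.add R2 t)
              | none => R2) ∧
            pvM g (match pvSym? s with
              | some t => if PySem.Set.contains R2 t then R2
                          else pvFillA g fuel t (PySem.Set.add R2 t)
              | none => R2) ≤ fuel := by
          intro s hs R2 hinv2
          cases hsym : pvSym? s with
          | none => exact ⟨hrefl R2, hinv2⟩
          | some t =>
            dsimp only
            by_cases hc : t ∈ R2
            · rw [if_pos ((PySem.Set.contains_iff _ _).mpr hc)]
              exact ⟨hrefl R2, hinv2⟩
            · rw [if_neg (fun h => hc ((PySem.Set.contains_iff _ _).mp h))]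
              have hedge : t ∈ pvSuccs g v := pvMem_succs.mpr ⟨rep, hrep, s, hs, hsym⟩
              have htc : t ∈ pvCand g := pvSucc_mem_cand hedge
              have hlt : pvM g (PySem.Set.add R2 t) < fuel :=
                lt_of_lt_of_le (pvM_add_lt g htc hc) hinv2
              have hmono : ∀ x ∈ R2, x ∈ pvFillA g fuel t (PySem.Set.add R2 t) :=
                fun x hx => pvFillA_mono g fuel t _ x ((PySem.Set.mem_add R2 t x).mpr (Or.inl hx))
              have hmono' : ∀ x ∈ PySem.Set.add R2 t, x ∈ pvFillA g fuel t (PySem.Set.add R2 t) :=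
                pvFillA_mono g fuel t _
              have hMres : pvM g (pvFillA g fuel t (PySem.Set.add R2 t)) ≤ pvM g R2 :=
                pvM_mono g hmono
              refine ⟨⟨hmono, ?_, hMres⟩, le_trans hMres hinv2⟩
              intro y hy hyR2
              by_cases hya : y ∈ PySem.Set.add R2 t
              · rcases (PySem.Set.mem_add R2 t y).mp hya with h' | h'
                · exact absurd h' hyR2
                · subst h'
                  exact pvFillA_succ_self g fuel y (PySem.Set.add R2 y) (by omega)
              · exact ih t (PySem.Set.add R2 t) hlt y hy hya
        refine ⟨pvFoldlRelInv r (fun R' => pvM g R' ≤ fuel) htrans (fun x _ => hrefl x)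
          _ _ R1 hinv1 hsub, ?_⟩
        have := pvFoldlRelInv r (fun R' => pvM g R' ≤ fuel) htrans (fun x _ => hrefl x)
          _ _ R1 hinv1 hsub
        calc pvM g _ ≤ pvM g R1 := this.2.2
          _ ≤ fuel := hinv1
      exact hmain.2.1

-- B's loop unfolding with symbol steps expressed through pvSym?
theorem pvLoopB_succ_eq (g : PySem.Dict String (List (List String))) (fuel : Nat)
    (st : List String × PySem.Set String) :
    pvLoopB g (fuel+1) st =
      match PySem.List.pop? st.1 (-1) with
      | none => st.2
      | some (v, rest) =>
        pvLoopB g fuel ((g.getD v []).foldl (fun p rep =>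
          rep.foldl (fun (p : List String × PySem.Set String) s =>
            match pvSym? s with
            | some t => if PySem.Set.contains p.2 t then p
                        else (p.1 ++ [t], PySem.Set.add p.2 t)
            | none => p) p) (rest, st.2)) := by
  conv_lhs => rw [pvLoopB]
  simp only [pvStepB_eq]

theorem pvPop_eq {stack : List String} {v : String} {rest : List String}
    (h : PySem.List.pop? stack (-1) = some (v, rest)) : stack = rest ++ [v] := by
  rcases List.eq_nil_or_concat stack with hnil | ⟨L, b, hLb⟩
  · subst hnil; simp [PySem.List.pop?] at h
  · subst hLb
    rw [List.concat_eq_append, PySem.List.pop?_last] at h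
    obtain ⟨h1, h2⟩ : b = v ∧ L = rest := by
      have := Option.some.inj h
      exact ⟨congrArg Prod.fst this, congrArg Prod.snd this⟩
    rw [List.concat_eq_append, h1, h2]

-- each symbol step of B only grows the reachable set
theorem pvStepB_mono2 (p : List String × PySem.Set String) (s : String) :
    ∀ x ∈ p.2, x ∈ (match pvSym? s with
      | some t => if PySem.Set.contains p.2 t then p
                  else (p.1 ++ [t], PySem.Set.add p.2 t)
      | none => p).2 := by
  intro x hx
  cases hsym : pvSym? s with
  | none => simpa using hx
  | some t =>
    dsimp only
    by_cases hc : t ∈ p.2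
    · rw [if_pos ((PySem.Set.contains_iff _ _).mpr hc)]; exact hx
    · rw [if_neg (fun h => hc ((PySem.Set.contains_iff _ _).mp h))]
      exact (PySem.Set.mem_add p.2 t x).mpr (Or.inl hx)

theorem pvLoopB_mono (g : PySem.Dict String (List (List String))) :
    ∀ fuel st, ∀ x ∈ st.2, x ∈ pvLoopB g fuel st := by
  intro fuel
  induction fuel with
  | zero => intro st x hx; simpa [pvLoopB] using hx
  | succ fuel ih =>
    intro st x hx
    rw [pvLoopB_succ_eq]
    cases hpop : PySem.List.pop? st.1 (-1) with
    | none => exact hx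
    | some p =>
      obtain ⟨v, rest⟩ := p
      dsimp only
      apply ih
      exact pvFoldlPred (fun p => x ∈ p.2) _ _ (rest, st.2) hx
        (fun rep _ p hp => pvFoldlPred (fun p => x ∈ p.2) _ _ p hp
          (fun s _ p' hp' => pvStepB_mono2 p' s x hp'))

theorem pvLoopB_sound (g : PySem.Dict String (List (List String))) (start : String) :
    ∀ fuel stack R, (∀ x ∈ stack, x ∈ R) → (∀ x ∈ R, pvReach g start x) →
      ∀ x ∈ pvLoopB g fuel (stack, R), pvReach g start x := by
  intro fuel
  induction fuel with
  | zero =>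
    intro stack R _ hreach x hx
    exact hreach x (by simpa [pvLoopB] using hx)
  | succ fuel ih =>
    intro stack R hsub hreach x hx
    rw [pvLoopB_succ_eq] at hx
    cases hpop : PySem.List.pop? stack (-1) with
    | none => rw [hpop] at hx; exact hreach x hx
    | some p =>
      obtain ⟨v, rest⟩ := p
      rw [hpop] at hx; dsimp only at hx
      have hstack := pvPop_eq hpop
      have hvreach : pvReach g start v := hreach v (hsub v (by rw [hstack]; simp))
      have hinv : (fun (p : List String × PySem.Set String) =>
          (∀ y ∈ p.1, y ∈ p.2) ∧ (∀ y ∈ p.2, pvReach g start y))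
          ((g.getD v []).foldl (fun p rep =>
            rep.foldl (fun (p : List String × PySem.Set String) s =>
              match pvSym? s with
              | some t => if PySem.Set.contains p.2 t then p
                          else (p.1 ++ [t], PySem.Set.add p.2 t)
              | none => p) p) (rest, R)) := by
        refine pvFoldlPred
          (fun (p : List String × PySem.Set String) =>
            (∀ y ∈ p.1, y ∈ p.2) ∧ (∀ y ∈ p.2, pvReach g start y)) _ _ (rest, R)
          ⟨fun y hy => hsub y (by rw [hstack]; simp [hy]), hreach⟩ ?_
        intro rep hrep p hp
        refine pvFoldlPred
          (fun (p : List String × PySem.Set String) =>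
            (∀ y ∈ p.1, y ∈ p.2) ∧ (∀ y ∈ p.2, pvReach g start y)) _ _ p hp ?_
        intro s hs q hq
        cases hsym : pvSym? s with
        | none => simpa using hq
        | some t =>
          dsimp only
          by_cases hc : t ∈ q.2
          · rw [if_pos ((PySem.Set.contains_iff _ _).mpr hc)]; exact hq
          · rw [if_neg (fun h => hc ((PySem.Set.contains_iff _ _).mp h))]
            have hedge : t ∈ pvSuccs g v := pvMem_succs.mpr ⟨rep, hrep, s, hs, hsym⟩
            have htreach : pvReach g start t := Relation.ReflTransGen.tail hvreach hedge
            constructor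
            · intro y hy
              rcases List.mem_append.mp hy with h' | h'
              · exact (PySem.Set.mem_add q.2 t y).mpr (Or.inl (hq.1 y h'))
              · exact (PySem.Set.mem_add q.2 t y).mpr (Or.inr (List.mem_singleton.mp h'))
            · intro y hy
              rcases (PySem.Set.mem_add q.2 t y).mp hy with h' | h'
              · exact hq.2 y h'
              · exact h' ▸ htreach
      exact ih _ _ hinv.1 hinv.2 x hx

theorem pvLoopB_closed (g : PySem.Dict String (List (List String))) :
    ∀ fuel stack R, (∀ x ∈ stack, x ∈ R) → stack.Nodup →
      (∀ y ∈ R, y ∉ stack → ∀ z ∈ pvSuccs g y, z ∈ R) →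
      stack.length + pvM g R < fuel →
      ∀ y ∈ pvLoopB g fuel (stack, R), ∀ z ∈ pvSuccs g y, z ∈ pvLoopB g fuel (stack, R) := by
  intro fuel
  induction fuel with
  | zero => intro stack R _ _ _ hlt; exact absurd hlt (by omega)
  | succ fuel ih =>
    intro stack R hsub hnd hclosed hlt
    rw [pvLoopB_succ_eq]
    cases hpop : PySem.List.pop? stack (-1) with
    | none =>
      dsimp only
      have hstack : stack = [] := by
        rcases List.eq_nil_or_concat stack with hnil | ⟨L, b, hLb⟩
        · exact hnil
        · subst hLb
          rw [List.concat_eq_append, PySem.List.pop?_last] at hpop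
          cases hpop
      subst hstack
      intro y hy z hz
      exact hclosed y hy (by simp) z hz
    | some p =>
      obtain ⟨v, rest⟩ := p
      dsimp only
      have hstack := pvPop_eq hpop
      have hnd' : rest.Nodup ∧ v ∉ rest := by
        rw [hstack] at hnd
        exact ⟨(List.sublist_append_left rest [v]).nodup hnd,
          fun hv => (List.disjoint_of_nodup_append hnd) hv (List.mem_singleton.mpr rfl)⟩
      have hrsub : ∀ x ∈ rest, x ∈ R := fun x hx => hsub x (by rw [hstack]; simp [hx])
      have hlen : stack.length = rest.length + 1 := by rw [hstack]; simp
      by_cases hgv : g.contains v = true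
      case neg =>
        have hnil : g.getD v [] = [] :=
          PySem.Dict.getD_of_not_contains g [] (by simpa using hgv)
        have hsuccv : pvSuccs g v = [] := by simp [pvSuccs, hnil]
        rw [hnil]
        dsimp only [List.foldl]
        refine ih rest R hrsub hnd'.1 ?_ (by omega)
        intro y hy hyrest z hz
        by_cases hyv : y = v
        · subst hyv; rw [hsuccv] at hz; cases hz
        · refine hclosed y hy ?_ z hz
          rw [hstack]
          simp only [List.mem_append, List.mem_singleton]
          rintro (h | h)
          · exact hyrest h
          · exact hyv h
      case pos =>
        set J : List String × PySem.Set String → Prop := fun p =>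
          (∀ x ∈ p.1, x ∈ p.2) ∧ p.1.Nodup ∧
          (∀ y ∈ p.2, y ∉ p.1 → y = v ∨ (∀ z ∈ pvSuccs g y, z ∈ p.2)) ∧
          p.1.length + pvM g p.2 ≤ rest.length + pvM g R with hJdef
        set F : List String × PySem.Set String :=
          (g.getD v []).foldl (fun p rep =>
            rep.foldl (fun (p : List String × PySem.Set String) s =>
              match pvSym? s with
              | some t => if PySem.Set.contains p.2 t then p
                          else (p.1 ++ [t], PySem.Set.add p.2 t)
              | none => p) p) (rest, R) with hFdef
        have hJ0 : J (rest, R) := by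
          refine ⟨hrsub, hnd'.1, ?_, le_refl _⟩
          intro y hy hyrest
          by_cases hyv : y = v
          · exact Or.inl hyv
          · refine Or.inr (hclosed y hy ?_)
            rw [hstack]
            simp only [List.mem_append, List.mem_singleton]
            rintro (h | h)
            · exact hyrest h
            · exact hyv h
        have hJstep : ∀ rep ∈ g.getD v [], ∀ p, J p →
            J (rep.foldl (fun (p : List String × PySem.Set String) s =>
              match pvSym? s with
              | some t => if PySem.Set.contains p.2 t then p
                          else (p.1 ++ [t], PySem.Set.add p.2 t)
              | none => p) p) := by
          intro rep hrep p hp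
          refine pvFoldlPred J _ _ p hp ?_
          intro s hs q hq
          cases hsym : pvSym? s with
          | none => simpa using hq
          | some t =>
            dsimp only
            by_cases hc : t ∈ q.2
            · rw [if_pos ((PySem.Set.contains_iff _ _).mpr hc)]; exact hq
            · rw [if_neg (fun h => hc ((PySem.Set.contains_iff _ _).mp h))]
              obtain ⟨j1, j2, j3, j4⟩ := hq
              have hedge : t ∈ pvSuccs g v := pvMem_succs.mpr ⟨rep, hrep, s, hs, hsym⟩
              have htc : t ∈ pvCand g := pvSucc_mem_cand hedge
              have htq1 : t ∉ q.1 := fun h => hc (j1 t h)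
              have hMlt : pvM g (PySem.Set.add q.2 t) < pvM g q.2 := pvM_add_lt g htc hc
              refine ⟨?_, ?_, ?_, ?_⟩
              · intro x hx
                rcases List.mem_append.mp hx with h' | h'
                · exact (PySem.Set.mem_add q.2 t x).mpr (Or.inl (j1 x h'))
                · exact (PySem.Set.mem_add q.2 t x).mpr (Or.inr (List.mem_singleton.mp h'))
              · exact List.Nodup.append j2 (List.nodup_singleton t)
                  (by intro a ha hb; exact htq1 ((List.mem_singleton.mp hb) ▸ ha))
              · intro y hy hynot
                have hyt : y ≠ t := fun h => hynot (h ▸ (by simp))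
                have hy2 : y ∈ q.2 := by
                  rcases (PySem.Set.mem_add q.2 t y).mp hy with h' | h'
                  · exact h'
                  · exact absurd h' hyt
                have hy1 : y ∉ q.1 := fun h => hynot (List.mem_append.mpr (Or.inl h))
                rcases j3 y hy2 hy1 with h' | h'
                · exact Or.inl h'
                · exact Or.inr (fun z hz => (PySem.Set.mem_add q.2 t z).mpr (Or.inl (h' z hz)))
              · simp only [List.length_append, List.length_singleton]
                omega
        have hJF : J F := pvFoldlPred J _ _ (rest, R) hJ0 hJstep
        have hcap : ∀ z ∈ pvSuccs g v, z ∈ F.2 := by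
          intro z hz
          obtain ⟨rep, hrep, s, hs, hsym⟩ := pvMem_succs.mp hz
          rw [hFdef]
          refine pvFoldlAttain (fun p => z ∈ p.2) _ _ (rest, R) rep hrep ?_ ?_
          · intro p
            refine pvFoldlAttain (fun p => z ∈ p.2) _ _ p s hs ?_ ?_
            · intro q
              simp only [hsym]
              by_cases hc : z ∈ q.2
              · rw [if_pos ((PySem.Set.contains_iff _ _).mpr hc)]; exact hc
              · rw [if_neg (fun h => hc ((PySem.Set.contains_iff _ _).mp h))]
                exact (PySem.Set.mem_add q.2 z z).mpr (Or.inr rfl)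
            · intro s' _ q hq
              exact pvStepB_mono2 q s' z hq
          · intro rep' _ p hp
            exact pvFoldlPred (fun p => z ∈ p.2) _ _ p hp
              (fun s' _ q hq => pvStepB_mono2 q s' z hq)
        obtain ⟨j1, j2, j3, j4⟩ := hJF
        have hclosed' : ∀ y ∈ F.2, y ∉ F.1 → ∀ z ∈ pvSuccs g y, z ∈ F.2 := by
          intro y hy hynot z hz
          rcases j3 y hy hynot with h' | h'
          · subst h'; exact hcap z hz
          · exact h' z hz
        have hlt' : F.1.length + pvM g F.2 < fuel := by omega
        exact ih F.1 F.2 j1 j2 hclosed' hlt' 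

theorem pvFillA_char (g : PySem.Dict String (List (List String))) (start : String) (F : Nat)
    (hF : pvM g [start] < F) :
    ∀ x, x ∈ pvFillA g F start [start] ↔ pvReach g start x := by
  intro x
  constructor
  · intro hx
    rcases (pvFillA_mono_sound g F start [start]).2 x hx with h | h
    · rw [List.mem_singleton] at h; exact h ▸ Relation.ReflTransGen.refl
    · exact h.to_reflTransGen
  · intro hr
    induction hr with
    | refl => exact pvFillA_mono g F start [start] start (by simp)
    | @tail b c hab hbc ih =>
      by_cases hb : b = start
      · exact pvFillA_succ_self g F start [start] (by omega) _ (hb ▸ hbc)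
      · exact pvFillA_closed g F start [start] hF _ ih (by simp [hb]) _ hbc

theorem pvLoopB_char (g : PySem.Dict String (List (List String))) (start : String) (F : Nat)
    (hF : 1 + pvM g [start] < F) :
    ∀ x, x ∈ pvLoopB g F ([start], [start]) ↔ pvReach g start x := by
  intro x
  constructor
  · intro hx
    exact pvLoopB_sound g start F [start] [start] (fun y hy => hy)
      (fun y hy => (List.mem_singleton.mp hy) ▸ Relation.ReflTransGen.refl) x hx
  · intro hr
    induction hr with
    | refl => exact pvLoopB_mono g F ([start], [start]) start (by simp)
    | @tail b c hab hbc ih =>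
      refine pvLoopB_closed g F [start] [start] (fun y hy => hy) (List.nodup_singleton start)
        (fun y hy hny => absurd hy hny) ?_ b ih c hbc
      have := hF
      simp only [List.length_singleton]
      omega

theorem pvFilterMap_if {α β : Type} (l : List α) (p : α → Bool) (f : α → β) :
    l.filterMap (fun v => if p v then some (f v) else none) = (l.filter p).map f := by
  induction l with
  | nil => rfl
  | cons a l ih => by_cases h : p a <;> simp [h, ih]

-- ===== VERDICT (by name: the statement is the Claim_ definition above) =====
theorem remove_unreachable_vars_py_spec : Claim_equal_remove_unreachable_vars_py := by
  intro old_grammar _ _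
  unfold Spec_remove_unreachable_vars_py
  unfold remove_unreachable_vars_py remove_unreachable_vars_py_alt
  cases hk : (PySem.Dict.ofList old_grammar).keys with
  | nil => simp [hk]
  | cons start rest =>
    simp only [hk]
    have hstart : PySem.Set.add PySem.Set.empty start = [start] := rfl
    rw [hstart]
    have hA := pvFillA_char (PySem.Dict.ofList old_grammar) start (pvFuel old_grammar)
      (pvM_lt_fuel old_grammar [start])
    have hB := pvLoopB_char (PySem.Dict.ofList old_grammar) start (pvFuel old_grammar + 1)
      (by have := pvM_lt_fuel old_grammar [start]; omega)
    have hcv : ∀ v, PySem.Set.contains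
        (pvFillA (PySem.Dict.ofList old_grammar) (pvFuel old_grammar) start [start]) v
        = PySem.Set.contains
        (pvLoopB (PySem.Dict.ofList old_grammar) (pvFuel old_grammar + 1) ([start], [start])) v := by
      intro v
      have hmem := (hA v).trans (hB v).symm
      cases hA' : PySem.Set.contains
          (pvFillA (PySem.Dict.ofList old_grammar) (pvFuel old_grammar) start [start]) v with
      | true =>
        have := hmem.mp ((PySem.Set.contains_iff _ _).mp hA')
        exact ((PySem.Set.contains_iff _ _).mpr this).symm
      | false =>
        cases hB' : PySem.Set.contains
            (pvLoopB (PySem.Dict.ofList old_grammar) (pvFuel old_grammar + 1) ([start], [start])) v with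
        | true =>
          have := hmem.mpr ((PySem.Set.contains_iff _ _).mp hB')
          rw [(PySem.Set.contains_iff _ _).mpr this] at hA'; cases hA'
        | false => rfl
    rw [PySem.List.foldl_append_if
      (p := fun v => PySem.Set.contains
        (pvFillA (PySem.Dict.ofList old_grammar) (pvFuel old_grammar) start [start]) v)
      (f := fun v => (v, PySem.Set.ofList ((PySem.Dict.ofList old_grammar).getD v [])))]
    rw [pvFilterMap_if]
    rw [List.filter_congr (fun v _ => hcv v)]
    simp
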